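-- pv_equiv track=rewrite | github.com/Hugo-Blvr/funAdapt_project | 05_benchmark/borne_plot.py | reduire_intervalles
-- ===== SOURCE A (Python) =====
-- def reduire_intervalles(liste, x):
--     liste = sorted(liste)
--     pas_de_base = liste[1] - liste[0]
--     min_val = liste[0]
--     max_val = liste[-1]
--     meilleur_resultat = None
--     meilleur_total = 0
--
--     for facteur in range(1, (max_val - 0) // pas_de_base + 1):
--         pas = facteur * pas_de_base
--         # On ne garde le pas que si min_val et max_val sont alignés avec ce pas
--         if (0 - min_val) % pas != 0 or (max_val - 0) % pas != 0: continue
--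
--         gauche = list(range(min_val + pas, 0, pas))
--         droite = list(range(pas, max_val, pas))
--         total = 1 + len(gauche) + 1 + len(droite) + 1  # min + gauche + 0 + droite + max
--         if total <= x and total > meilleur_total:
--             meilleur_resultat = [min_val] + gauche + [0] + droite + [max_val]
--             meilleur_total = total
--
--     if meilleur_resultat is None: return [min_val, 0, max_val]
--
--     return meilleur_resultat
-- ===== SOURCE B (Python) =====
-- def reduire_intervalles(liste, x):
--     liste = sorted(liste)
--     min_val = liste[0]
--     max_val = liste[-1]
--     pas_de_base = liste[1] - liste[0]
--
--     # any admissible step divides both endpoints, hence their gcd (Euclid)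
--     a, b = abs(min_val), abs(max_val)
--     while b:
--         a, b = b, a % b
--     g = a
--
--     def total(pas):
--         # closed-form point count: min + gauche + 0 + droite + max
--         return 3 + max(0, -min_val // pas - 1) + max_val // pas - 1
--
--     # the point count is strictly decreasing in the step, so the best step is the
--     # SMALLEST divisor of g that is a multiple of pas_de_base, lies in range and
--     # keeps the count within x; enumerate divisors of g in O(sqrt g)
--     best = None
--     i = 1
--     while i * i <= g:
--         if g % i == 0:
--             for d in (i, g // i):
--                 if d % pas_de_base == 0 and d <= max_val and total(d) <= x:
--                     if best is None or d < best:
--                         best = d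
--         i += 1
--
--     if best is None:
--         return [min_val, 0, max_val]
--     return ([min_val] + list(range(min_val + best, 0, best)) + [0]
--             + list(range(best, max_val, best)) + [max_val])
-- ===== Notes on version B (the rewrite author's own statement) =====
-- stated objective: faster
-- what changed: B enumerates the divisors of gcd(min,max) by trial division up to sqrt(g) while threading a running minimum (the point count is strictly decreasing in the step, so the optimum is the smallest aligned divisor within budget) and builds the output list once, instead of scanning every multiple of the base step and materialising the gauche/droite point lists for each factor.
import Mathlib
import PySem

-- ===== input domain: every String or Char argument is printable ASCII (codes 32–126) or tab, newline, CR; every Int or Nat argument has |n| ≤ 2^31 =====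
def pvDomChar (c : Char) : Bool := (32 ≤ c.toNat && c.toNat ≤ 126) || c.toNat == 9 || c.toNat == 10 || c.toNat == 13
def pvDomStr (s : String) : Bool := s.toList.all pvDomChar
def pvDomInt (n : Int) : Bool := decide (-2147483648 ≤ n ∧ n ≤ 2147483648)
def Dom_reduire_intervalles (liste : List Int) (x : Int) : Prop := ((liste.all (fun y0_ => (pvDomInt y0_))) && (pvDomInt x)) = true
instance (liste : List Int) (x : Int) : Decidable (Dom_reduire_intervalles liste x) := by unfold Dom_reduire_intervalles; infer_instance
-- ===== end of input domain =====

-- B replaces A's scan over all multiples of the base step (building gauche/droite lists per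
-- factor) by an O(sqrt g) divisor enumeration of g = gcd(min,max) threading a running minimum:
-- the point count is strictly decreasing in the step, so the best step is the smallest
-- admissible divisor, and the output list is built once.

-- ===== PORT A =====
def reduire_intervalles (liste : List Int) (x : Int) : List Int :=
  let l := PySem.List.sorted liste (fun y => y) false
  match l with
  | l0 :: l1 :: rest =>
    let l := l0 :: l1 :: rest
    let pas_de_base := l1 - l0
    let min_val := l0
    let max_val := PySem.List.pyGetD l (-1) 0
    let st := (PySem.List.pyRange 1 (PySem.Int.floordiv (max_val - 0) pas_de_base + 1) 1).foldl
      (fun (s : Option (List Int) × Int) (facteur : Int) =>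
        let pas := facteur * pas_de_base
        if PySem.Int.mod (0 - min_val) pas ≠ 0 ∨ PySem.Int.mod (max_val - 0) pas ≠ 0 then s
        else
          let gauche := PySem.List.pyRange (min_val + pas) 0 pas
          let droite := PySem.List.pyRange pas max_val pas
          let total : Int := 1 + (gauche.length : Int) + 1 + (droite.length : Int) + 1
          if total ≤ x ∧ total > s.2 then
            (some ([min_val] ++ gauche ++ [0] ++ droite ++ [max_val]), total)
          else s)
      (none, 0)
    match st.1 with
    | none => [min_val, 0, max_val]
    | some r => r
  | _ => []   -- IndexError in Python (len < 2); excluded by Pre_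

-- ===== PORT B =====
-- closed-form point count of Source B's local `total(pas)`
def pvTotalB (min_val max_val pas : Int) : Int :=
  3 + max 0 (PySem.Int.floordiv (-min_val) pas - 1) + PySem.Int.floordiv max_val pas - 1

-- Source B's Euclid while-loop (a, b = b, a % b until b == 0); fuel only makes it structural:
-- |a % b| < |b|, so |b| + 1 steps always suffice
def pvEuclid (fuel : Nat) (a b : Int) : Int :=
  match fuel with
  | 0 => a
  | fuel + 1 => if b = 0 then a else pvEuclid fuel b (PySem.Int.mod a b)

-- Source B's divisor while-loop threading the running minimum `best`; fuel only makes it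
-- structural: i increases by 1 while i * i ≤ g, so (g + 1).toNat steps always suffice
def pvDivLoop (fuel : Nat) (g min_val max_val pas_de_base x i : Int) (best : Option Int) :
    Option Int :=
  match fuel with
  | 0 => best
  | fuel + 1 =>
    if i * i ≤ g then
      pvDivLoop fuel g min_val max_val pas_de_base x (i + 1)
        (if PySem.Int.mod g i == 0 then
          ([i, PySem.Int.floordiv g i]).foldl (fun best d =>
            if PySem.Int.mod d pas_de_base == 0 && decide (d ≤ max_val)
                && decide (pvTotalB min_val max_val d ≤ x) then
              match best with
              | none => some d
              | some b => if d < b then some d else some b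
            else best) best
        else best)
    else best

def reduire_intervalles_alt (liste : List Int) (x : Int) : List Int :=
  match PySem.List.sorted liste (fun y => y) false with
  | [] => []    -- IndexError in Python (len < 2); excluded by Pre_
  | [_] => []   -- IndexError in Python (len < 2); excluded by Pre_
  | l0 :: l1 :: rest =>
    let l := l0 :: l1 :: rest
    let min_val := l0
    let max_val := PySem.List.pyGetD l (-1) 0
    let pas_de_base := l1 - l0
    let g := pvEuclid (max_val.natAbs + 1) |min_val| |max_val|
    match pvDivLoop (g + 1).toNat g min_val max_val pas_de_base x 1 none with
    | none => [min_val, 0, max_val]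
    | some best =>
        [min_val] ++ PySem.List.pyRange (min_val + best) 0 best ++ [0]
          ++ PySem.List.pyRange best max_val best ++ [max_val]

-- ===== PRECONDITION & SPEC =====
-- Pre_ excludes exactly the inputs where the Python A raises: lists of length < 2 (IndexError on
-- liste[1]) and lists whose two smallest elements coincide (pas_de_base = 0, ZeroDivisionError).
def Pre_reduire_intervalles (liste : List Int) (_x : Int) : Prop :=
  2 ≤ liste.length ∧
  (PySem.List.sorted liste (fun y => y) false)[0]? ≠ (PySem.List.sorted liste (fun y => y) false)[1]?
instance (liste : List Int) (x : Int) : Decidable (Pre_reduire_intervalles liste x) := by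
  unfold Pre_reduire_intervalles; infer_instance

def pvWitness_reduire_intervalles : List Int × Int := ([-4, 6, -2], 7)

def Spec_reduire_intervalles (liste : List Int) (x : Int) (out : List Int) : Prop := out = reduire_intervalles_alt liste x
instance (liste : List Int) (x : Int) (out : List Int) : Decidable (Spec_reduire_intervalles liste x out) := by unfold Spec_reduire_intervalles; infer_instance

-- ===== CLAIM (what is proved, stated in full; the proofs are below) =====
def Claim_equal_reduire_intervalles : Prop := ∀ (liste : List Int) (x : Int), Dom_reduire_intervalles liste x → Pre_reduire_intervalles liste x → Spec_reduire_intervalles liste x (reduire_intervalles liste x)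

-- ===== LEMMAS AND PROOFS =====

-- proof-only abbreviations
def pvBuild (m M pas : Int) : List Int :=
  [m] ++ PySem.List.pyRange (m + pas) 0 pas ++ [0] ++ PySem.List.pyRange pas M pas ++ [M]

-- the common candidate predicate: an admissible step
def pvCand (m M p x d : Int) : Prop :=
  p ∣ d ∧ d ∣ m ∧ d ∣ M ∧ 1 ≤ d ∧ d ≤ M ∧ pvTotalB m M d ≤ x

-- B's inner filter test, as the port computes it
def pvQ (m M p x d : Int) : Bool :=
  PySem.Int.mod d p == 0 && decide (d ≤ M) && decide (pvTotalB m M d ≤ x)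

-- B's running-minimum update
def pvMin1 : Option Int → Int → Option Int
  | none, d => some d
  | some b, d => if d < b then some d else some b

def pvBStep (m M p x : Int) (best : Option Int) (d : Int) : Option Int :=
  if pvQ m M p x d then pvMin1 best d else best

-- the pure list of divisor candidates B's while-loop visits
def pvDivList (fuel : Nat) (g i : Int) : List Int :=
  match fuel with
  | 0 => []
  | fuel + 1 =>
    if i * i ≤ g then
      (if PySem.Int.mod g i == 0 then [i, PySem.Int.floordiv g i] else [])
        ++ pvDivList fuel g (i + 1)
    else []

-- ---- Euclid: nonnegativity and divisor characterisation ----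
lemma pvEuclid_nonneg : ∀ (fuel : Nat) (a b : Int), 0 ≤ a → 0 ≤ b → b.natAbs < fuel →
    0 ≤ pvEuclid fuel a b := by
  intro fuel
  induction fuel with
  | zero => intro a b _ _ h; omega
  | succ fuel ih =>
    intro a b ha hb hf
    unfold pvEuclid
    by_cases h : b = 0
    · rw [if_pos h]; exact ha
    · rw [if_neg h]
      have hb' : 0 < b := by omega
      have h1 := PySem.Int.mod_nonneg a hb'
      have h2 := PySem.Int.mod_lt a hb'
      exact ih b _ hb h1 (by omega)

lemma pvEuclid_dvd_iff : ∀ (fuel : Nat) (a b d : Int), 0 ≤ b → b.natAbs < fuel →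
    (d ∣ pvEuclid fuel a b ↔ d ∣ a ∧ d ∣ b) := by
  intro fuel
  induction fuel with
  | zero => intro a b d _ h; omega
  | succ fuel ih =>
    intro a b d hb hf
    unfold pvEuclid
    by_cases h : b = 0
    · rw [if_pos h]; subst h; simp
    · rw [if_neg h]
      have hb' : 0 < b := by omega
      have h1 := PySem.Int.mod_nonneg a hb'
      have h2 := PySem.Int.mod_lt a hb'
      rw [ih b (PySem.Int.mod a b) d h1 (by omega)]
      have hsplit := PySem.Int.floordiv_mul_add_mod a b
      constructor
      · rintro ⟨hx1, hx2⟩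
        refine ⟨?_, hx1⟩
        have hae : a = PySem.Int.floordiv a b * b + PySem.Int.mod a b := hsplit.symm
        rw [hae]
        exact dvd_add (Dvd.dvd.mul_left hx1 _) hx2
      · rintro ⟨hx1, hx2⟩
        refine ⟨hx2, ?_⟩
        have hm : PySem.Int.mod a b = a - PySem.Int.floordiv a b * b := by omega
        rw [hm]
        exact dvd_sub hx1 (Dvd.dvd.mul_left hx2 _)

-- ---- the while-loop is the fold of pvBStep over pvDivList ----
lemma pvDivLoop_eq_foldl (m M p x : Int) : ∀ (fuel : Nat) (g i : Int) (best : Option Int),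
    pvDivLoop fuel g m M p x i best = (pvDivList fuel g i).foldl (pvBStep m M p x) best := by
  intro fuel
  induction fuel with
  | zero => intro g i best; rfl
  | succ fuel ih =>
    intro g i best
    unfold pvDivLoop pvDivList
    have hfun : (fun (best : Option Int) (d : Int) =>
        if PySem.Int.mod d p == 0 && decide (d ≤ M) && decide (pvTotalB m M d ≤ x) then
          match best with
          | none => some d
          | some b => if d < b then some d else some b
        else best) = pvBStep m M p x := by
      funext b d
      unfold pvBStep pvQ pvMin1
      cases b <;> rfl
    by_cases h : i * i ≤ g
    · rw [if_pos h, if_pos h, List.foldl_append, ih]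
      congr 1
      split
      · rw [hfun]
      · rfl
    · rw [if_neg h, if_neg h]
      rfl

-- ---- divisor-list membership ----
lemma pvDivList_mem_sound (g : Int) : ∀ (fuel : Nat) (i : Int), 1 ≤ i →
    ∀ d ∈ pvDivList fuel g i, d ∣ g ∧ 1 ≤ d := by
  intro fuel
  induction fuel with
  | zero => intro i _ d hd; simp [pvDivList] at hd
  | succ fuel ih =>
    intro i hi d hd
    unfold pvDivList at hd
    by_cases h : i * i ≤ g
    · rw [if_pos h, List.mem_append] at hd
      rcases hd with hd | hd
      · have hgi : PySem.Int.mod g i == 0 := by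
          by_contra hc
          simp [hc] at hd
        rw [if_pos hgi] at hd
        have hdvd : i ∣ g := (PySem.Int.mod_eq_zero_iff_dvd g i).1 (by simpa using hgi)
        simp only [List.mem_cons] at hd
        rcases hd with rfl | hd
        · exact ⟨hdvd, hi⟩
        · simp at hd
          subst hd
          have hipos : 0 < i := by omega
          have hq : PySem.Int.floordiv g i = g / i := PySem.Int.floordiv_eq_ediv_of_pos hipos
          rw [hq]
          constructor
          · exact ⟨i, (Int.ediv_mul_cancel hdvd).symm.trans (by ring)⟩
          · rw [Int.le_ediv_iff_mul_le hipos]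
            nlinarith
      · exact ih (i + 1) (by omega) d hd
    · rw [if_neg h] at hd
      simp at hd

lemma pvDivList_mem_complete (g : Int) : ∀ (fuel : Nat) (i : Int), (g + 1 - i).toNat ≤ fuel →
    1 ≤ i → ∀ (j : Int), i ≤ j → j * j ≤ g → j ∣ g →
    j ∈ pvDivList fuel g i ∧ PySem.Int.floordiv g j ∈ pvDivList fuel g i := by
  intro fuel
  induction fuel with
  | zero =>
    intro i hf hi j hij hjj hjg
    exfalso
    have hgi : g < i := by omega
    have hj1 : (1:Int) ≤ j := by omega
    have hjle : j * 1 ≤ j * j := mul_le_mul_of_nonneg_left hj1 (by omega)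
    rw [mul_one] at hjle
    linarith
  | succ fuel ih =>
    intro i hf hi j hij hjj hjg
    have hig : i ≤ g := by nlinarith
    unfold pvDivList
    have h : i * i ≤ g := by nlinarith
    rw [if_pos h]
    rw [List.mem_append, List.mem_append]
    by_cases hji : j = i
    · subst hji
      have hmod : PySem.Int.mod g j == 0 := by
        simp [PySem.Int.mod_eq_zero_iff_dvd, hjg]
      rw [if_pos hmod]
      constructor
      · left; simp
      · left; simp
    · have hrec := ih (i + 1) (by omega) (by omega) j (by omega) hjj hjg
      exact ⟨Or.inr hrec.1, Or.inr hrec.2⟩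

lemma pvDivList_mem_of_dvd (fuel : Nat) (g d : Int) (hf : g.toNat ≤ fuel) (hg : 1 ≤ g)
    (hd : d ∣ g) (h1 : 1 ≤ d) : d ∈ pvDivList fuel g 1 := by
  have hf' : (g + 1 - 1).toNat ≤ fuel := by omega
  by_cases hdd : d * d ≤ g
  · exact (pvDivList_mem_complete g fuel 1 hf' le_rfl d h1 hdd hd).1
  · obtain ⟨t, ht⟩ := hd
    have ht1 : 1 ≤ t := by nlinarith
    have htd : t < d := by nlinarith
    have htg : t ∣ g := ⟨d, by rw [ht]; ring⟩
    have htt : t * t ≤ g := by nlinarith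
    have hfl : PySem.Int.floordiv g t = d := by
      rw [PySem.Int.floordiv_eq_ediv_of_pos (by omega : (0:Int) < t), ht,
        show d * t = t * d by ring, Int.mul_ediv_cancel_left _ (by omega : t ≠ 0)]
    have hmem := (pvDivList_mem_complete g fuel 1 hf' le_rfl t ht1 htt htg).2
    rwa [hfl] at hmem

-- ---- running-minimum fold characterisation ----
lemma pv_minfold (Q : Int → Bool) (L : List Int) : ∀ (acc : Option Int),
    ((L.foldl (fun b d => if Q d then pvMin1 b d else b) acc = none →
        acc = none ∧ ∀ w ∈ L, ¬ Q w = true) ∧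
     (∀ v, L.foldl (fun b d => if Q d then pvMin1 b d else b) acc = some v →
        (acc = some v ∨ (Q v = true ∧ v ∈ L)) ∧
        (∀ b, acc = some b → v ≤ b) ∧ (∀ w ∈ L, Q w = true → v ≤ w))) := by
  induction L with
  | nil =>
    intro acc
    refine ⟨fun h => ⟨h, by simp⟩, fun v hv => ⟨Or.inl hv, fun b hb => by simp_all, by simp⟩⟩
  | cons a L ih =>
    intro acc
    simp only [List.foldl_cons]
    by_cases hQ : Q a = true
    · constructor
      · intro hnone
        obtain ⟨hacc', -⟩ := (ih _).1 hnone
        exfalso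
        rw [if_pos hQ] at hacc'
        cases acc <;> simp [pvMin1] at hacc'
        split at hacc' <;> simp_all
      · intro v hv
        obtain ⟨hdisj, hmin, hall⟩ := (ih _).2 v hv
        rw [if_pos hQ] at hdisj hmin
        cases acc with
        | none =>
          simp only [pvMin1] at hdisj hmin
          have hva : v ≤ a := by
            rcases hdisj with h | h
            · exact le_of_eq (Option.some_inj.1 h).symm
            · exact hmin _ rfl
          refine ⟨?_, fun b hb => by simp at hb, ?_⟩
          · rcases hdisj with h | h
            · have hv' : v = a := (Option.some_inj.1 h).symm
              exact Or.inr ⟨hv' ▸ hQ, by simp [hv']⟩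
            · exact Or.inr ⟨h.1, List.mem_cons_of_mem _ h.2⟩
          · intro w hw hQw
            rcases List.mem_cons.1 hw with rfl | hwL
            · exact hva
            · exact hall w hwL hQw
        | some b0 =>
          simp only [pvMin1] at hdisj hmin
          have hvc : v ≤ if a < b0 then a else b0 := by
            rcases hdisj with h | h
            · have hsplit : (if a < b0 then some a else some b0)
                  = some (if a < b0 then a else b0) := by
                split <;> rfl
              rw [hsplit] at h
              exact le_of_eq (Option.some_inj.1 h).symm
            · have hsplit : (if a < b0 then some a else some b0)
                  = some (if a < b0 then a else b0) := by
                split <;> rfl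
              rw [hsplit] at hmin
              exact hmin _ rfl
          have hva : v ≤ a := by split at hvc <;> omega
          have hvb : v ≤ b0 := by split at hvc <;> omega
          refine ⟨?_, fun b hb => by rw [Option.some_inj.1 hb] at hvb; omega, ?_⟩
          · rcases hdisj with h | h
            · by_cases hab : a < b0
              · rw [if_pos hab] at h
                have hv' : v = a := (Option.some_inj.1 h).symm
                exact Or.inr ⟨hv' ▸ hQ, by simp [hv']⟩
              · rw [if_neg hab] at h
                exact Or.inl (by rw [← h])
            · exact Or.inr ⟨h.1, List.mem_cons_of_mem _ h.2⟩
          · intro w hw hQw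
            rcases List.mem_cons.1 hw with rfl | hwL
            · exact hva
            · exact hall w hwL hQw
    · rw [if_neg hQ]
      constructor
      · intro hnone
        obtain ⟨hacc, hall⟩ := (ih _).1 hnone
        exact ⟨hacc, by
          intro w hw
          rcases List.mem_cons.1 hw with rfl | hwL
          · simpa using hQ
          · exact hall w hwL⟩
      · intro v hv
        obtain ⟨hdisj, hmin, hall⟩ := (ih _).2 v hv
        refine ⟨by
          rcases hdisj with h | h
          · exact Or.inl h
          · exact Or.inr ⟨h.1, List.mem_cons_of_mem _ h.2⟩, hmin, by
          intro w hw hQw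
          rcases List.mem_cons.1 hw with rfl | hwL
          · exact absurd hQw (by simpa using hQ)
          · exact hall w hwL hQw⟩

-- ---- A's strict-improvement fold keeps the FIRST candidate when keys decrease along C ----
lemma pv_fold_stay (key : Int → Int) (bld : Int → List Int) (C : List Int) (r : Option (List Int))
    (k : Int) (h : ∀ b ∈ C, key b < k) :
    C.foldl (fun (s : Option (List Int) × Int) v =>
      if key v > s.2 then (some (bld v), key v) else s) (r, k) = (r, k) := by
  induction C with
  | nil => rfl
  | cons a C ih =>
    simp only [List.foldl_cons]
    rw [if_neg (by have := h a (by simp); simp; omega)]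
    exact ih (fun b hb => h b (List.mem_cons_of_mem _ hb))

lemma pv_fold_cons (key : Int → Int) (bld : Int → List Int) (c : Int) (rest : List Int)
    (hpw : (c :: rest).Pairwise (fun a b => key b < key a)) (hpos : 0 < key c) :
    (c :: rest).foldl (fun (s : Option (List Int) × Int) v =>
      if key v > s.2 then (some (bld v), key v) else s) (none, 0)
    = (some (bld c), key c) := by
  simp only [List.foldl_cons]
  rw [if_pos (by simpa using hpos)]
  exact pv_fold_stay key bld rest _ _ (List.pairwise_cons.1 hpw).1

-- ---- arithmetic: range lengths and the closed-form point count ----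
lemma pv_len_pyRange_pos (a b s : Int) (hs : 0 < s) :
    ((PySem.List.pyRange a b s).length : Int) = if a < b then (b - a + s - 1) / s else 0 := by
  rw [PySem.List.pyRange_of_pos a b hs]
  simp only [List.length_map, List.length_range]
  split_ifs with h
  · rw [Int.toNat_of_nonneg (Int.ediv_nonneg (by omega) (by omega))]
  · simp

lemma pv_mul_sub_one_ediv (pas t : Int) (hp : 0 < pas) : (pas * t - 1) / pas = t - 1 := by
  have h : pas * t - 1 = (pas - 1) + pas * (t - 1) := by ring
  rw [h, Int.add_mul_ediv_left _ _ (by omega : pas ≠ 0),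
      Int.ediv_eq_zero_of_lt (by omega) (by omega)]
  omega

lemma pv_len_gauche (m pas : Int) (hp : 0 < pas) (hd : pas ∣ m) :
    ((PySem.List.pyRange (m + pas) 0 pas).length : Int)
      = max 0 (PySem.Int.floordiv (-m) pas - 1) := by
  obtain ⟨k, hk⟩ := hd
  have hfd : PySem.Int.floordiv (-m) pas = -k := by
    rw [PySem.Int.floordiv_eq_ediv_of_pos hp, hk]
    rw [show -(pas * k) = pas * (-k) by ring, Int.mul_ediv_cancel_left _ (by omega : pas ≠ 0)]
  rw [pv_len_pyRange_pos _ _ _ hp, hfd]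
  subst hk
  split_ifs with h
  · have : 0 - (pas * k + pas) + pas - 1 = pas * (-k) - 1 := by ring
    rw [this, pv_mul_sub_one_ediv _ _ hp]
    have hk2 : k ≤ -2 := by nlinarith
    omega
  · have hk2 : -1 ≤ k := by nlinarith
    omega

lemma pv_len_droite (M pas : Int) (hp : 0 < pas) (hle : pas ≤ M) (hd : pas ∣ M) :
    ((PySem.List.pyRange pas M pas).length : Int) = PySem.Int.floordiv M pas - 1 := by
  obtain ⟨j, hj⟩ := hd
  have hfd : PySem.Int.floordiv M pas = j := by
    rw [PySem.Int.floordiv_eq_ediv_of_pos hp, hj, Int.mul_ediv_cancel_left _ (by omega : pas ≠ 0)]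
  rw [pv_len_pyRange_pos _ _ _ hp, hfd]
  subst hj
  have hj1 : 1 ≤ j := by nlinarith
  split_ifs with h
  · have heq : pas * j - pas + pas - 1 = pas * j - 1 := by ring
    rw [heq, pv_mul_sub_one_ediv _ _ hp]
  · have : j ≤ 1 := by nlinarith
    omega

lemma pv_key_pos (m M pas : Int) (hp : 0 < pas) (hle : pas ≤ M) (hd : pas ∣ M) :
    0 < pvTotalB m M pas := by
  obtain ⟨j, hj⟩ := hd
  have hfd : PySem.Int.floordiv M pas = j := by
    rw [PySem.Int.floordiv_eq_ediv_of_pos hp, hj, Int.mul_ediv_cancel_left _ (by omega : pas ≠ 0)]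
  have hj1 : 1 ≤ j := by nlinarith
  unfold pvTotalB
  rw [hfd]
  omega

-- the point count is strictly decreasing along admissible steps
lemma pv_key_anti (m M p x d1 d2 : Int) (hc1 : pvCand m M p x d1) (hc2 : pvCand m M p x d2)
    (h12 : d1 < d2) : pvTotalB m M d2 < pvTotalB m M d1 := by
  obtain ⟨-, h1m, h1M, h1p, h1le, -⟩ := hc1
  obtain ⟨-, h2m, h2M, h2p, h2le, -⟩ := hc2
  have hd1 : (0:Int) < d1 := by omega
  have hd2 : (0:Int) < d2 := by omega
  have hM : (0:Int) < M := by omega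
  unfold pvTotalB
  rw [PySem.Int.floordiv_eq_ediv_of_pos hd1, PySem.Int.floordiv_eq_ediv_of_pos hd2,
      PySem.Int.floordiv_eq_ediv_of_pos hd1, PySem.Int.floordiv_eq_ediv_of_pos hd2]
  have ht1 : d1 * (M / d1) = M := Int.mul_ediv_cancel' h1M
  have ht2 : d2 * (M / d2) = M := Int.mul_ediv_cancel' h2M
  have ht2pos : 1 ≤ M / d2 := by rw [Int.le_ediv_iff_mul_le hd2]; omega
  have htlt : M / d2 < M / d1 := by nlinarith
  have hmax : max 0 ((-m) / d2 - 1) ≤ max 0 ((-m) / d1 - 1) := by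
    by_cases hm : 0 ≤ -m
    · have hA2 : 0 ≤ (-m) / d2 := Int.ediv_nonneg hm (by omega)
      have hle : (-m) / d2 ≤ (-m) / d1 := by
        rw [Int.le_ediv_iff_mul_le hd1]
        calc (-m) / d2 * d1 ≤ (-m) / d2 * d2 := by nlinarith
        _ ≤ -m := Int.ediv_mul_le _ (by omega)
      omega
    · have hm' : 0 < m := by omega
      have hs1 : d1 ≤ m := Int.le_of_dvd hm' h1m
      have hs2 : d2 ≤ m := Int.le_of_dvd hm' h2m
      have he1 : (-m) / d1 = -(m / d1) := by
        obtain ⟨s, hs⟩ := h1m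
        rw [hs, show -(d1 * s) = d1 * (-s) by ring, Int.mul_ediv_cancel_left _ (by omega),
            Int.mul_ediv_cancel_left _ (by omega)]
      have he2 : (-m) / d2 = -(m / d2) := by
        obtain ⟨s, hs⟩ := h2m
        rw [hs, show -(d2 * s) = d2 * (-s) by ring, Int.mul_ediv_cancel_left _ (by omega),
            Int.mul_ediv_cancel_left _ (by omega)]
      have hq1 : 1 ≤ m / d1 := by rw [Int.le_ediv_iff_mul_le hd1]; omega
      have hq2 : 1 ≤ m / d2 := by rw [Int.le_ediv_iff_mul_le hd2]; omega
      rw [he1, he2]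
      omega
  omega

-- ---- the multiples list A scans ----
lemma pv_range_mul (p M : Int) (hp : 0 < p) :
    PySem.List.pyRange p (M + 1) p
      = (PySem.List.pyRange 1 (PySem.Int.floordiv (M - 0) p + 1) 1).map (· * p) := by
  rw [PySem.Int.floordiv_eq_ediv_of_pos hp, PySem.List.pyRange_of_pos _ _ hp,
      PySem.List.pyRange_one]
  have hn : (if p < M + 1 then ((M + 1 - p + p - 1) / p).toNat else 0) = ((M - 0) / p).toNat := by
    have he : M + 1 - p + p - 1 = M - 0 := by ring
    rw [he]
    split_ifs with h
    · rfl
    · have : (M - 0) / p < 1 := by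
        rw [Int.ediv_lt_iff_lt_mul hp]; omega
      omega
  rw [hn, List.map_map]
  have h1 : ((M - 0) / p + 1 - 1) = (M - 0) / p := by ring
  rw [h1]
  apply List.map_congr_left
  intro k _
  simp only [Function.comp]
  ring

lemma pv_mem_range_iff (p M v : Int) (hp : 0 < p) :
    v ∈ PySem.List.pyRange p (M + 1) p ↔ p ∣ v ∧ 1 ≤ v ∧ v ≤ M := by
  rw [PySem.List.mem_pyRange_iff_of_pos hp]
  constructor
  · rintro ⟨h1, h2, h3⟩
    have hv : p ∣ v := by
      have hadd := dvd_add h3 (dvd_refl p)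
      simpa using hadd
    exact ⟨hv, by omega, by omega⟩
  · rintro ⟨h1, h2, h3⟩
    have hpv : p ≤ v := Int.le_of_dvd (by omega) h1
    exact ⟨hpv, by omega, dvd_sub h1 (dvd_refl p)⟩

lemma pv_range_pairwise (p M : Int) (hp : 0 < p) :
    (PySem.List.pyRange p (M + 1) p).Pairwise (· < ·) := by
  rw [PySem.List.pyRange_of_pos _ _ hp]
  rw [List.pairwise_map]
  apply List.Pairwise.imp ?_ List.pairwise_lt_range
  intro a b hab
  have hab' : (a : Int) < (b : Int) := by exact_mod_cast hab
  nlinarith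

-- ---- the core equivalence on the values extracted from the sorted list ----
lemma pv_core (m M p x : Int) (hp : 0 < p) :
    (match ((PySem.List.pyRange 1 (PySem.Int.floordiv (M - 0) p + 1) 1).foldl
      (fun (s : Option (List Int) × Int) (facteur : Int) =>
        let pas := facteur * p
        if PySem.Int.mod (0 - m) pas ≠ 0 ∨ PySem.Int.mod (M - 0) pas ≠ 0 then s
        else
          let gauche := PySem.List.pyRange (m + pas) 0 pas
          let droite := PySem.List.pyRange pas M pas
          let total : Int := 1 + (gauche.length : Int) + 1 + (droite.length : Int) + 1
          if total ≤ x ∧ total > s.2 then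
            (some ([m] ++ gauche ++ [0] ++ droite ++ [M]), total)
          else s)
      (none, 0)).1 with
     | none => [m, 0, M]
     | some r => r)
    = (match pvDivLoop (pvEuclid (M.natAbs + 1) |m| |M| + 1).toNat
          (pvEuclid (M.natAbs + 1) |m| |M|) m M p x 1 none with
      | none => [m, 0, M]
      | some best => pvBuild m M best) := by
  -- A's loop body, rewritten over the multiples pas = facteur * p
  have hbody : ∀ (acc : Option (List Int) × Int) (pas : Int),
      pas ∈ PySem.List.pyRange p (M + 1) p →
      (fun (s : Option (List Int) × Int) (pas : Int) =>
        if PySem.Int.mod (0 - m) pas ≠ 0 ∨ PySem.Int.mod (M - 0) pas ≠ 0 then s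
        else
          let gauche := PySem.List.pyRange (m + pas) 0 pas
          let droite := PySem.List.pyRange pas M pas
          let total : Int := 1 + (gauche.length : Int) + 1 + (droite.length : Int) + 1
          if total ≤ x ∧ total > s.2 then
            (some ([m] ++ gauche ++ [0] ++ droite ++ [M]), total)
          else s) acc pas
      = (fun (s : Option (List Int) × Int) (pas : Int) =>
          if (pas ∣ m ∧ pas ∣ M) ∧ pvTotalB m M pas ≤ x then
            (if pvTotalB m M pas > s.2 then (some (pvBuild m M pas), pvTotalB m M pas) else s)
          else s) acc pas := by
    intro acc pas hmem
    obtain ⟨hpdv, h1, hMv⟩ := (pv_mem_range_iff p M pas hp).1 hmem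
    have h0 : (0:Int) < pas := by omega
    by_cases hd : pas ∣ m ∧ pas ∣ M
    · have hiff : ¬ (PySem.Int.mod (0 - m) pas ≠ 0 ∨ PySem.Int.mod (M - 0) pas ≠ 0) := by
        simp only [zero_sub, sub_zero, PySem.Int.mod_eq_zero_iff_dvd, dvd_neg, not_or, not_not]
        exact hd
      simp only [if_neg hiff]
      have hg := pv_len_gauche m pas h0 hd.1
      have hdr := pv_len_droite M pas h0 hMv hd.2
      simp only [hg, hdr]
      have htot : (1 + max 0 (PySem.Int.floordiv (-m) pas - 1) + 1
          + (PySem.Int.floordiv M pas - 1) + 1) = pvTotalB m M pas := by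
        unfold pvTotalB; ring
      rw [htot]
      simp only [pvBuild]
      split_ifs <;> first | rfl | tauto
    · have hiff : PySem.Int.mod (0 - m) pas ≠ 0 ∨ PySem.Int.mod (M - 0) pas ≠ 0 := by
        simp only [ne_eq, zero_sub, sub_zero, PySem.Int.mod_eq_zero_iff_dvd, dvd_neg]
        tauto
      simp only [if_pos hiff]
      rw [if_neg (by tauto)]
  -- the A-side candidate list
  set C := (PySem.List.pyRange p (M + 1) p).filter
      (fun pas => decide ((pas ∣ m ∧ pas ∣ M) ∧ pvTotalB m M pas ≤ x)) with hCdef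
  have hCmemCand : ∀ w ∈ C, pvCand m M p x w := by
    intro w hw
    rw [hCdef, List.mem_filter] at hw
    obtain ⟨hwL, hwP⟩ := hw
    have hP := of_decide_eq_true hwP
    obtain ⟨hpdv, h1, hMv⟩ := (pv_mem_range_iff p M w hp).1 hwL
    exact ⟨hpdv, hP.1.1, hP.1.2, h1, hMv, hP.2⟩
  have hCandCmem : ∀ w, pvCand m M p x w → w ∈ C := by
    intro w hc
    obtain ⟨hpdv, hwm, hwM, h1, hMv, hkey⟩ := hc
    rw [hCdef, List.mem_filter]
    exact ⟨(pv_mem_range_iff p M w hp).2 ⟨hpdv, h1, hMv⟩, decide_eq_true ⟨⟨hwm, hwM⟩, hkey⟩⟩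
  have hCpw : C.Pairwise (· < ·) := (pv_range_pairwise p M hp).filter _
  have hCkey : C.Pairwise (fun a b => pvTotalB m M b < pvTotalB m M a) := by
    have hmem := List.Pairwise.and_mem.1 hCpw
    refine (List.Pairwise.imp ?_ hmem)
    rintro a b ⟨ha, hb, hab⟩
    exact pv_key_anti m M p x a b (hCmemCand a ha) (hCmemCand b hb) hab
  have hCpos : ∀ c ∈ C, 0 < pvTotalB m M c := by
    intro c hc
    obtain ⟨-, -, hcM, h1, hMv, -⟩ := hCmemCand c hc
    exact pv_key_pos m M c (by omega) hMv hcM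
  -- A's fold equals the strict-improvement fold over C
  have hfold : ((PySem.List.pyRange 1 (PySem.Int.floordiv (M - 0) p + 1) 1).foldl
      (fun (s : Option (List Int) × Int) (facteur : Int) =>
        let pas := facteur * p
        if PySem.Int.mod (0 - m) pas ≠ 0 ∨ PySem.Int.mod (M - 0) pas ≠ 0 then s
        else
          let gauche := PySem.List.pyRange (m + pas) 0 pas
          let droite := PySem.List.pyRange pas M pas
          let total : Int := 1 + (gauche.length : Int) + 1 + (droite.length : Int) + 1
          if total ≤ x ∧ total > s.2 then
            (some ([m] ++ gauche ++ [0] ++ droite ++ [M]), total)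
          else s)
      (none, 0))
      = C.foldl (fun (s : Option (List Int) × Int) (pas : Int) =>
          if pvTotalB m M pas > s.2 then (some (pvBuild m M pas), pvTotalB m M pas) else s)
          (none, 0) := by
    have h2 := List.foldl_map (f := fun (f : Int) => f * p)
      (g := fun (s : Option (List Int) × Int) (pas : Int) =>
        if PySem.Int.mod (0 - m) pas ≠ 0 ∨ PySem.Int.mod (M - 0) pas ≠ 0 then s
        else
          let gauche := PySem.List.pyRange (m + pas) 0 pas
          let droite := PySem.List.pyRange pas M pas
          let total : Int := 1 + (gauche.length : Int) + 1 + (droite.length : Int) + 1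
          if total ≤ x ∧ total > s.2 then
            (some ([m] ++ gauche ++ [0] ++ droite ++ [M]), total)
          else s)
      (l := PySem.List.pyRange 1 (PySem.Int.floordiv (M - 0) p + 1) 1)
      (init := ((none : Option (List Int)), (0 : Int)))
    rw [← pv_range_mul p M hp] at h2
    refine Eq.trans (h2.symm) (Eq.trans (PySem.List.foldl_congr_mem _ _ _ _ hbody)
      (PySem.List.foldl_ite_eq_foldl_filter
          (fun pas => (pas ∣ m ∧ pas ∣ M) ∧ pvTotalB m M pas ≤ x)
          (fun (s : Option (List Int) × Int) (pas : Int) =>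
            if pvTotalB m M pas > s.2 then (some (pvBuild m M pas), pvTotalB m M pas) else s)
          (PySem.List.pyRange p (M + 1) p) ((none : Option (List Int)), (0 : Int))))
  rw [hfold]
  -- B's loop: gcd, divisor list, running minimum
  have habs : |M|.natAbs < M.natAbs + 1 := by
    rw [Int.natAbs_abs]; omega
  have hg0 : 0 ≤ pvEuclid (M.natAbs + 1) |m| |M| :=
    pvEuclid_nonneg _ _ _ (abs_nonneg m) (abs_nonneg M) habs
  have hdvd : ∀ d : Int, d ∣ pvEuclid (M.natAbs + 1) |m| |M| ↔ d ∣ m ∧ d ∣ M := by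
    intro d
    rw [pvEuclid_dvd_iff _ _ _ _ (abs_nonneg M) habs, dvd_abs, dvd_abs]
  set g := pvEuclid (M.natAbs + 1) |m| |M| with hgdef
  set DL := pvDivList (g + 1).toNat g 1 with hDLdef
  have hDQ : ∀ d ∈ DL, pvQ m M p x d = true → pvCand m M p x d := by
    intro d hd hQ
    obtain ⟨hdg, h1⟩ := pvDivList_mem_sound g (g + 1).toNat 1 le_rfl d hd
    obtain ⟨hdm, hdM⟩ := (hdvd d).1 hdg
    unfold pvQ at hQ
    simp only [Bool.and_eq_true, beq_iff_eq, decide_eq_true_eq] at hQ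
    exact ⟨(PySem.Int.mod_eq_zero_iff_dvd d p).1 hQ.1.1, hdm, hdM, h1, hQ.1.2, hQ.2⟩
  have hCandDQ : ∀ d, pvCand m M p x d → d ∈ DL ∧ pvQ m M p x d = true := by
    intro d hc
    obtain ⟨hpdv, hdm, hdM, h1, hMv, hkey⟩ := hc
    have hg1 : 1 ≤ g := by
      rcases lt_or_eq_of_le hg0 with h | h
      · omega
      · exfalso
        obtain ⟨-, hgM⟩ := (hdvd g).1 (dvd_refl g)
        rw [← h] at hgM
        have hM0 : M = 0 := zero_dvd_iff.1 hgM
        omega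
    refine ⟨pvDivList_mem_of_dvd (g + 1).toNat g d (by omega) hg1 ((hdvd d).2 ⟨hdm, hdM⟩) h1, ?_⟩
    unfold pvQ
    simp only [Bool.and_eq_true, beq_iff_eq, decide_eq_true_eq]
    exact ⟨⟨(PySem.Int.mod_eq_zero_iff_dvd d p).2 hpdv, hMv⟩, hkey⟩
  have hloop : pvDivLoop (g + 1).toNat g m M p x 1 none = DL.foldl (pvBStep m M p x) none :=
    pvDivLoop_eq_foldl m M p x (g + 1).toNat g 1 none
  rw [hloop]
  have hminf := pv_minfold (pvQ m M p x) DL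
  cases hC : C with
  | nil =>
    simp only [List.foldl_nil]
    cases hB : DL.foldl (pvBStep m M p x) none with
    | none => rfl
    | some v =>
      exfalso
      obtain ⟨hdisj, -, -⟩ := (hminf none).2 v hB
      rcases hdisj with h | h
      · exact absurd h (by simp)
      · have hvC := hCandCmem v (hDQ v h.2 h.1)
        rw [hC] at hvC
        simp at hvC
  | cons c rest =>
    have hcC : c ∈ C := by rw [hC]; simp
    have hcc := hCmemCand c hcC
    obtain ⟨hcDL, hcQ⟩ := hCandDQ c hcc
    rw [pv_fold_cons (fun d => pvTotalB m M d) (pvBuild m M) c rest (hC ▸ hCkey)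
      (hCpos c hcC)]
    cases hB : DL.foldl (pvBStep m M p x) none with
    | none =>
      exfalso
      obtain ⟨-, hall⟩ := (hminf none).1 hB
      exact hall c hcDL hcQ
    | some v =>
      obtain ⟨hdisj, -, hall⟩ := (hminf none).2 v hB
      have hvc : pvCand m M p x v := by
        rcases hdisj with h | h
        · exact absurd h (by simp)
        · exact hDQ v h.2 h.1
      have hvC : v ∈ C := hCandCmem v hvc
      have hcv : c ≤ v := by
        rw [hC] at hvC
        rcases List.mem_cons.1 hvC with rfl | hvrest
        · exact le_refl _
        · have hlt := (List.pairwise_cons.1 (hC ▸ hCpw)).1 v hvrest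
          omega
      have hvle : v ≤ c := hall c hcDL hcQ
      have hveq : v = c := le_antisymm hvle hcv
      subst hveq
      rfl

-- ===== VERDICT =====
theorem reduire_intervalles_spec : Claim_equal_reduire_intervalles := by
  intro liste x hdom hpre
  unfold Spec_reduire_intervalles
  obtain ⟨hlen, hne⟩ := hpre
  have hlens : (PySem.List.sorted liste (fun y => y) false).length = liste.length :=
    PySem.List.length_sorted liste (fun y => y) false
  match hL : PySem.List.sorted liste (fun y => y) false with
  | [] => rw [hL] at hlens; simp at hlens; omega
  | [a] => rw [hL] at hlens; simp at hlens; omega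
  | l0 :: l1 :: rest =>
    rw [hL] at hne
    have hle : l0 ≤ l1 := by
      have hpw := PySem.List.sorted_pairwise (xs := liste) (key := fun y => y)
      rw [hL] at hpw
      exact (List.pairwise_cons.1 hpw).1 l1 (by simp)
    have hp : 0 < l1 - l0 := by
      simp at hne; omega
    unfold reduire_intervalles reduire_intervalles_alt
    rw [hL]
    exact pv_core l0 (PySem.List.pyGetD (l0 :: l1 :: rest) (-1) 0) (l1 - l0) x hp
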